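-- pv_equiv track=rewrite | github.com/Tadeo-Vazquez/VAZQUEZ_TADEO_PP_112 | Paquete/funciones.py | calcular_clientes_mas_paquetes_medianos
-- ===== SOURCE A (Python) =====
-- def calcular_clientes_mas_paquetes_medianos(planilla_clientes:list):
--     clientes_mas_paquetes_medianos = []
--     mayor_envios_medianos = planilla_clientes[0][1]
--     for i in range(1,len(planilla_clientes)):
--         if planilla_clientes[i][1] > mayor_envios_medianos:
--             mayor_envios_medianos = planilla_clientes[i][1]
--     for i in range(len(planilla_clientes)):
--         if mayor_envios_medianos == planilla_clientes[i][1]: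
--             clientes_mas_paquetes_medianos += [f"Cliente N°{i+1}"]
--     return clientes_mas_paquetes_medianos
-- ===== SOURCE B (Python) =====
-- def calcular_clientes_mas_paquetes_medianos(planilla_clientes: list):
--     mayor = planilla_clientes[0][1]
--     ganadores = ["Cliente N°1"]
--     for i, cliente in enumerate(planilla_clientes[1:], start=2):
--         cantidad = cliente[1]
--         if cantidad > mayor:
--             mayor = cantidad
--             ganadores = [f"Cliente N°{i}"]
--         elif cantidad == mayor:
--             ganadores += [f"Cliente N°{i}"]
--     return ganadores
-- ===== Notes on version B (the rewrite author's own statement) =====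
-- stated objective: alternative
-- what changed: A scans the list twice (one pass to find the maximum, a second indexed pass to collect labels); B fuses both into a single pass over enumerate(planilla[1:], start=2) that maintains the running maximum and the candidate label list together, resetting the list when a new maximum appears.
import Mathlib
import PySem

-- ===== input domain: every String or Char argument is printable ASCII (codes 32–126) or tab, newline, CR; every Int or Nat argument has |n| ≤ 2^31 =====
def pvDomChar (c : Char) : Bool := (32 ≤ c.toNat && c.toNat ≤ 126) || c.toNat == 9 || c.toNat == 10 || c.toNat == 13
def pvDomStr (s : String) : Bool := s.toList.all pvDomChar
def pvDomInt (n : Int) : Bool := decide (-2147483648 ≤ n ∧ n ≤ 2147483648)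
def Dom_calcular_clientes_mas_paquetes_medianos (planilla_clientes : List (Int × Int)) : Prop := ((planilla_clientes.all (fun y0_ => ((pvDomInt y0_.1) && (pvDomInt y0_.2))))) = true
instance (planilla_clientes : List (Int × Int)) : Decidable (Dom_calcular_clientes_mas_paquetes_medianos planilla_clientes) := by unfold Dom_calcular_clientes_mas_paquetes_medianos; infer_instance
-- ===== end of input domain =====

-- B replaces A's two sequential scans (max pass, then indexed collect pass) by one fused
-- pass that maintains the running maximum and the candidate label list together (objective: alternative).

-- ===== PORT A =====
def calcular_clientes_mas_paquetes_medianos (planilla_clientes : List (Int × Int)) : List String :=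
  match planilla_clientes.head? with
  | none => []   -- Python raises IndexError on planilla_clientes[0]; excluded by Pre_
  | some c0 =>
    let mayor := (PySem.List.pyRange 1 (planilla_clientes.length : Int) 1).foldl
      (fun m i =>
        if (PySem.List.pyGetD planilla_clientes i (0, 0)).2 > m
        then (PySem.List.pyGetD planilla_clientes i (0, 0)).2 else m) c0.2
    (PySem.List.pyRange 0 (planilla_clientes.length : Int) 1).foldl
      (fun acc i =>
        if mayor == (PySem.List.pyGetD planilla_clientes i (0, 0)).2
        then acc ++ ["Cliente N°" ++ PySem.Int.toStr (i + 1)] else acc) []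

-- ===== PORT B =====
def calcular_clientes_mas_paquetes_medianos_alt (planilla_clientes : List (Int × Int)) : List String :=
  match planilla_clientes with
  | [] => []     -- Python raises IndexError on planilla_clientes[0]; excluded by Pre_
  | c0 :: resto =>
    ((PySem.List.enumerate resto 2).foldl
      (fun (st : Int × List String) p =>
        if p.2.2 > st.1 then (p.2.2, ["Cliente N°" ++ PySem.Int.toStr p.1])
        else if p.2.2 == st.1 then (st.1, st.2 ++ ["Cliente N°" ++ PySem.Int.toStr p.1])
        else st)
      (c0.2, ["Cliente N°1"])).2

-- ===== PRECONDITION & SPEC =====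
-- A raises IndexError on the empty list (planilla_clientes[0]); Pre_ excludes exactly that input.
def Pre_calcular_clientes_mas_paquetes_medianos (planilla_clientes : List (Int × Int)) : Prop :=
  planilla_clientes ≠ []
instance (planilla_clientes : List (Int × Int)) : Decidable (Pre_calcular_clientes_mas_paquetes_medianos planilla_clientes) := by unfold Pre_calcular_clientes_mas_paquetes_medianos; infer_instance

def pvWitness_calcular_clientes_mas_paquetes_medianos : (List (Int × Int)) := [(1, 2), (3, 2), (4, 1)]

def Spec_calcular_clientes_mas_paquetes_medianos (planilla_clientes : List (Int × Int)) (out : List String) : Prop := out = calcular_clientes_mas_paquetes_medianos_alt planilla_clientes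
instance (planilla_clientes : List (Int × Int)) (out : List String) : Decidable (Spec_calcular_clientes_mas_paquetes_medianos planilla_clientes out) := by unfold Spec_calcular_clientes_mas_paquetes_medianos; infer_instance

-- ===== CLAIM (what is proved, stated in full; the proofs are below) =====
def Claim_equal_calcular_clientes_mas_paquetes_medianos : Prop := ∀ (planilla_clientes : List (Int × Int)), Dom_calcular_clientes_mas_paquetes_medianos planilla_clientes → Pre_calcular_clientes_mas_paquetes_medianos planilla_clientes → Spec_calcular_clientes_mas_paquetes_medianos planilla_clientes (calcular_clientes_mas_paquetes_medianos planilla_clientes)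

-- ===== LEMMAS AND PROOFS =====

-- running maximum of the second components, seeded with m (the shape both ports' loops compute)
def pvRunMax (m : Int) (t : List (Int × Int)) : Int :=
  t.foldl (fun a x => if x.2 > a then x.2 else a) m

theorem pvRunMax_cons (m : Int) (x : Int × Int) (t : List (Int × Int)) :
    pvRunMax m (x :: t) = pvRunMax (if x.2 > m then x.2 else m) t := rfl

theorem le_pvRunMax : ∀ (t : List (Int × Int)) (m : Int), m ≤ pvRunMax m t := by
  intro t
  induction t with
  | nil => intro m; simp [pvRunMax]
  | cons x t ih =>
    intro m
    rw [pvRunMax_cons]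
    have := ih (if x.2 > m then x.2 else m)
    split_ifs at this ⊢ with h
    · omega
    · exact this

-- the fused single-pass loop of B, characterised: it returns the running max and
-- (old candidates if the max did not grow) ++ labels of the positions achieving the max
theorem pvFused :
    ∀ (t : List (Int × Int)) (s m : Int) (res : List String),
    (PySem.List.enumerate t s).foldl
      (fun (st : Int × List String) p =>
        if p.2.2 > st.1 then (p.2.2, ["Cliente N°" ++ PySem.Int.toStr p.1])
        else if p.2.2 == st.1 then (st.1, st.2 ++ ["Cliente N°" ++ PySem.Int.toStr p.1])
        else st)
      (m, res)
    = (pvRunMax m t,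
       (if pvRunMax m t = m then res else [])
         ++ ((PySem.List.enumerate t s).filter (fun p => p.2.2 == pvRunMax m t)).map
              (fun p => "Cliente N°" ++ PySem.Int.toStr p.1)) := by
  intro t
  induction t with
  | nil => intro s m res; simp [pvRunMax, PySem.List.enumerate_nil]
  | cons x t ih =>
    intro s m res
    rw [PySem.List.enumerate_cons, pvRunMax_cons]
    by_cases h1 : x.2 > m
    · simp only [List.foldl_cons, List.filter_cons, if_pos h1]
      rw [ih]
      have hge : x.2 ≤ pvRunMax x.2 t := le_pvRunMax t x.2
      have hne : ¬ (pvRunMax x.2 t = m) := by omega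
      by_cases h2 : x.2 = pvRunMax x.2 t
      · simp [← h2, ne_of_gt h1]
      · have hb : (x.2 == pvRunMax x.2 t) = false := by simp [h2]
        have hne2 : ¬ pvRunMax x.2 t = x.2 := fun h => h2 h.symm
        simp [hb, hne, hne2]
    · by_cases h2 : x.2 = m
      · simp only [List.foldl_cons, List.filter_cons, h2, beq_self_eq_true, if_pos]
        rw [ih]
        have hge : m ≤ pvRunMax m t := le_pvRunMax t m
        by_cases h3 : pvRunMax m t = m
        · simp [h3]
        · have : (m == pvRunMax m t) = false := by simp; omega
          simp [h3, this]
      · have hb : (x.2 == m) = false := by simp [h2]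
        simp only [List.foldl_cons, List.filter_cons, if_neg h1, hb, if_neg (by simp : ¬ false = true)]
        rw [ih]
        have hge : m ≤ pvRunMax m t := le_pvRunMax t m
        have : (x.2 == pvRunMax m t) = false := by simp; omega
        simp [this]

-- shifting the enumeration start by one is absorbed into the label arithmetic (and == flipped)
theorem pvShiftLab (M : Int) : ∀ (t : List (Int × Int)) (s : Int),
    ((PySem.List.enumerate t (s + 1)).filter (fun p => p.2.2 == M)).map
        (fun p => "Cliente N°" ++ PySem.Int.toStr p.1)
    = ((PySem.List.enumerate t s).filter (fun p => M == p.2.2)).map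
        (fun p => "Cliente N°" ++ PySem.Int.toStr (p.1 + 1)) := by
  intro t
  induction t with
  | nil => intro s; simp [PySem.List.enumerate_nil]
  | cons x t ih =>
    intro s
    rw [PySem.List.enumerate_cons, PySem.List.enumerate_cons, List.filter_cons, List.filter_cons]
    by_cases h : x.2 = M
    · simp [h, ih (s + 1)]
    · have h1 : (x.2 == M) = false := by simp [h]
      have h2 : (M == x.2) = false := by simp; exact fun e => h e.symm
      simp [h1, h2, ih (s + 1)]

-- A's result, characterised as a filter over the enumeration
theorem pvA_char (c0 : Int × Int) (t : List (Int × Int)) :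
    calcular_clientes_mas_paquetes_medianos (c0 :: t)
    = ((PySem.List.enumerate (c0 :: t) 0).filter (fun p => pvRunMax c0.2 t == p.2.2)).map
        (fun p => "Cliente N°" ++ PySem.Int.toStr (p.1 + 1)) := by
  simp only [calcular_clientes_mas_paquetes_medianos, List.head?]
  rw [PySem.List.foldl_pyRange_pyGetD' (c0 :: t) ((0, 0) : Int × Int)
        (fun m x => if x.2 > m then x.2 else m) c0.2 (a := 1) (by omega)]
  rw [PySem.List.enumerate_eq_map_pyRange (c0 :: t) ((0, 0) : Int × Int),
      List.filter_map, List.map_map]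
  rw [PySem.List.foldl_append_if]
  simp [Function.comp_def, pvRunMax, PySem.List.len]

-- B's result via the fused-loop characterisation
theorem pvB_char (c0 : Int × Int) (t : List (Int × Int)) :
    calcular_clientes_mas_paquetes_medianos_alt (c0 :: t)
    = (if pvRunMax c0.2 t = c0.2 then ["Cliente N°1"] else [])
        ++ ((PySem.List.enumerate t 2).filter (fun p => p.2.2 == pvRunMax c0.2 t)).map
             (fun p => "Cliente N°" ++ PySem.Int.toStr p.1) := by
  simp only [calcular_clientes_mas_paquetes_medianos_alt]
  rw [pvFused]

-- ===== VERDICT (by name: the statement is the Claim_ definition above) =====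
theorem calcular_clientes_mas_paquetes_medianos_spec : Claim_equal_calcular_clientes_mas_paquetes_medianos := by
  intro l _ hpre
  unfold Spec_calcular_clientes_mas_paquetes_medianos
  match l with
  | [] => exact absurd rfl hpre
  | c0 :: t =>
    rw [pvA_char, pvB_char]
    have h2 : (2 : Int) = 1 + 1 := by norm_num
    rw [h2, pvShiftLab (pvRunMax c0.2 t) t 1]
    rw [PySem.List.enumerate_cons, List.filter_cons]
    by_cases hm : pvRunMax c0.2 t = c0.2
    · have hb : (pvRunMax c0.2 t == ((0 : Int), c0).2.2) = true := by simp [hm]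
      simp [hm]
      decide
    · have hb : (pvRunMax c0.2 t == ((0 : Int), c0).2.2) = false := by simp [hm]
      simp [hb, hm]
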